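-- pv_equiv track=rewrite | github.com/kanhar/leetcode | problems/interviews/fb_recursion.py | findEncryptedWord
-- ===== SOURCE A (Python) =====
-- def findEncryptedWord(s):
--     if s == '':
--         return ''
--     elif len(s) == 1:
--         return s
--     a = 0
--     b = len(s)-1
--     mid = (a+b)//2
--
--     return s[mid] + findEncryptedWord(s[:mid]) + findEncryptedWord(s[mid+1:])
-- ===== SOURCE B (Python) =====
-- def findEncryptedWord(s):
--     out = []
--     stack = [(0, len(s))]
--     while stack:
--         lo, hi = stack.pop()
--         if lo >= hi:
--             continue
--         mid = lo + (hi - lo - 1) // 2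
--         out.append(s[mid])
--         stack.append((mid + 1, hi))
--         stack.append((lo, mid))
--     return ''.join(out)
-- ===== Notes on version B (the rewrite author's own statement) =====
-- stated objective: alternative
-- what changed: Replaced the slicing recursion with an explicit-stack loop over (lo,hi) index ranges that appends s[mid] and pushes the right then left half, avoiding string slicing and recursion entirely.
import Mathlib
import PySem

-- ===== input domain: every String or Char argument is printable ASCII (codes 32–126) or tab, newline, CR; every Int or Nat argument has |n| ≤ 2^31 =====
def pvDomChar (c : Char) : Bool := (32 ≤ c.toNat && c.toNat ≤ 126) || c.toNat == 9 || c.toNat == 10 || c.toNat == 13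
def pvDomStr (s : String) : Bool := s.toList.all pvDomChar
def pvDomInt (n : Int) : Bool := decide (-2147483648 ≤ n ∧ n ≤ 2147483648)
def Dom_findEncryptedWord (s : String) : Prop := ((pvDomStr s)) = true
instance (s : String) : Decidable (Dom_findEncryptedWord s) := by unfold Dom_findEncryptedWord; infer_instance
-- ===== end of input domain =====

-- B replaces A's slicing recursion by an explicit stack loop over (lo,hi) index ranges (alternative decomposition; same return value).

-- ===== PORT A =====
-- Recursive middle-first split over List Char; a = 0 and b = len(s)-1 are inlined in
-- mid = (0 + (l.length - 1)) / 2.  The index s[mid] is always in range (mid < len),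
-- so the getElem carries its proof; the slices are PySem slices.
def findEncryptedWordList (l : List Char) : List Char :=
  if h : l = [] then []
  else if l.length = 1 then l
  else
    l[(0 + (l.length - 1)) / 2]'(by have := List.length_pos_iff.mpr h; omega) ::
      (findEncryptedWordList (PySem.List.slice l none (some (((0 + (l.length - 1)) / 2 : Nat) : Int))) ++
       findEncryptedWordList (PySem.List.slice l (some ((((0 + (l.length - 1)) / 2 : Nat) : Int) + 1)) none))
termination_by l.length
decreasing_by
  · rw [PySem.List.slice_to_natCast]
    have := List.length_pos_iff.mpr h
    simp; omega
  · have h1 : ((((0 + (l.length - 1)) / 2 : Nat) : Int) + 1) = (((0 + (l.length - 1)) / 2 + 1 : Nat) : Int) := by push_cast; ring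
    rw [h1, PySem.List.slice_from_natCast]
    have := List.length_pos_iff.mpr h
    simp; omega

def findEncryptedWord (s : String) : String := String.ofList (findEncryptedWordList s.toList)

-- ===== PORT B =====
-- Explicit-stack loop: pop (lo,hi); skip empty ranges; else append s[mid] and push
-- (mid+1,hi) then (lo,mid), so (lo,mid) is on top.  s[mid] is always in range, ported
-- as pyGetD (the default is never used).
def encLoop (l : List Char) (stack : List (Nat × Nat)) (out : List Char) : List Char :=
  match stack with
  | [] => out
  | (lo, hi) :: rest =>
    if lo ≥ hi then encLoop l rest out
    else
      encLoop l ((lo, lo + (hi - lo - 1) / 2) :: (lo + (hi - lo - 1) / 2 + 1, hi) :: rest)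
        (out ++ [PySem.List.pyGetD l ((lo + (hi - lo - 1) / 2 : Nat) : Int) ' '])
termination_by (stack.map (fun p => 2 * (p.2 - p.1))).sum + stack.length
decreasing_by
  · simp; omega
  · simp; omega

def findEncryptedWord_alt (s : String) : String :=
  String.ofList (encLoop s.toList [(0, s.toList.length)] [])

-- ===== PRECONDITION & SPEC =====
def Spec_findEncryptedWord (s : String) (out : String) : Prop := out = findEncryptedWord_alt s
instance (s : String) (out : String) : Decidable (Spec_findEncryptedWord s out) := by unfold Spec_findEncryptedWord; infer_instance

-- ===== CLAIM (what is proved, stated in full; the proofs are below) =====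
def Claim_equal_findEncryptedWord : Prop := ∀ (s : String), Dom_findEncryptedWord s → Spec_findEncryptedWord s (findEncryptedWord s)

-- ===== LEMMAS AND PROOFS =====

-- One-step unfolding of A's recursion, valid for every nonempty list (the length-1
-- branch coincides with the general formula, since then mid = 0 and both slices are empty).
theorem encA_unfold (t : List Char) (h : t ≠ []) :
    findEncryptedWordList t =
      t[(t.length - 1) / 2]'(by have := List.length_pos_iff.mpr h; omega) ::
        (findEncryptedWordList (t.take ((t.length - 1) / 2)) ++
         findEncryptedWordList (t.drop ((t.length - 1) / 2 + 1))) := by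
  have hp := List.length_pos_iff.mpr h
  rw [findEncryptedWordList, dif_neg h]
  by_cases h1 : t.length = 1
  · obtain ⟨c, ht⟩ : ∃ c, t = [c] := by
      rcases t with _ | ⟨c, t'⟩
      · simp at hp
      · rcases t' with _ | _
        · exact ⟨c, rfl⟩
        · simp at h1
    subst ht
    simp [findEncryptedWordList]
  · rw [if_neg h1]
    have hc : ((((0 + (t.length - 1)) / 2 : Nat) : Int) + 1) = (((0 + (t.length - 1)) / 2 + 1 : Nat) : Int) := by
      push_cast; ring
    rw [hc, PySem.List.slice_to_natCast, PySem.List.slice_from_natCast]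
    simp

-- A on the segment [lo, hi) of l, split at B's mid = lo + (hi-lo-1)/2.
theorem encA_seg_split (l : List Char) (lo hi : Nat) (hlh : lo < hi) (hhi : hi ≤ l.length) :
    findEncryptedWordList ((l.drop lo).take (hi - lo)) =
      l[lo + (hi - lo - 1) / 2]'(by omega) ::
        (findEncryptedWordList ((l.drop lo).take (lo + (hi - lo - 1) / 2 - lo)) ++
         findEncryptedWordList ((l.drop (lo + (hi - lo - 1) / 2 + 1)).take (hi - (lo + (hi - lo - 1) / 2 + 1)))) := by
  have ht : ((l.drop lo).take (hi - lo)).length = hi - lo := by simp; omega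
  have hne : (l.drop lo).take (hi - lo) ≠ [] := by
    rw [← List.length_pos_iff, ht]; omega
  rw [encA_unfold _ hne]
  simp only [ht]
  congr 1
  · -- the middle character
    rw [List.getElem_take, List.getElem_drop]
  · congr 1
    · -- left half
      rw [List.take_take, show min ((hi - lo - 1) / 2) (hi - lo) = lo + (hi - lo - 1) / 2 - lo from by omega]
    · -- right half
      rw [List.drop_take, List.drop_drop,
          show hi - lo - ((hi - lo - 1) / 2 + 1) = hi - (lo + (hi - lo - 1) / 2 + 1) from by omega,
          show lo + ((hi - lo - 1) / 2 + 1) = lo + (hi - lo - 1) / 2 + 1 from by omega]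

-- A returns [] on the empty string.
theorem encA_nil : findEncryptedWordList [] = [] := by
  rw [findEncryptedWordList]; simp

-- The stack loop emits exactly the concatenation of A's results over the stacked segments.
theorem encLoop_eq (l : List Char) (stack : List (Nat × Nat)) (out : List Char)
    (hb : ∀ p ∈ stack, p.2 ≤ l.length) :
    encLoop l stack out =
      out ++ (stack.map (fun p => findEncryptedWordList ((l.drop p.1).take (p.2 - p.1)))).flatten := by
  revert hb
  fun_induction encLoop l stack out with
  | case1 out => intro _; simp
  | case2 out lo hi rest hge ih =>
    intro hb
    rw [ih (fun p hp => hb p (List.mem_cons_of_mem _ hp))]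
    have h0 : hi - lo = 0 := by omega
    simp [h0, encA_nil]
  | case3 out lo hi rest hge ih =>
    intro hb
    have hhi : hi ≤ l.length := hb (lo, hi) (List.mem_cons_self ..)
    have hlh : lo < hi := by omega
    have hchar : PySem.List.pyGetD l ((lo + (hi - lo - 1) / 2 : Nat) : Int) ' ' =
        l[lo + (hi - lo - 1) / 2]'(by omega) := by
      rw [PySem.List.pyGetD_natCast]
      exact List.getD_eq_getElem l ' ' (by omega)
    rw [ih ?_]
    · simp only [List.map_cons, List.flatten_cons, hchar]
      rw [encA_seg_split l lo hi hlh hhi]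
      simp
    · intro p hp
      simp only [List.mem_cons] at hp
      rcases hp with h | h | h
      · subst h; simp; omega
      · subst h; exact hhi
      · exact hb p (List.mem_cons_of_mem _ h)

-- ===== VERDICT (by name: the statement is the Claim_ definition above) =====
theorem findEncryptedWord_spec : Claim_equal_findEncryptedWord := by
  intro s _
  unfold Spec_findEncryptedWord findEncryptedWord findEncryptedWord_alt
  rw [encLoop_eq _ _ _ (by simp)]
  simp [List.take_of_length_le]
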